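-- pv_equiv track=rewrite | github.com/RobinsonSdG/YugiStats | tools.py | different_cards_of_set_in_hand
-- ===== SOURCE A (Python) =====
-- def in_hand(hand, card):
--     return card in hand
--
-- def different_cards_of_set_in_hand(hand, card_set):
--     number_card_of_set_in_hand = 0
--     diff = 0
--     for card in card_set:
--         number_card_of_set_in_hand += hand.count(card)
--         if in_hand(hand, card):
--             diff += 1
--     return number_card_of_set_in_hand
-- ===== SOURCE B (Python) =====
-- def different_cards_of_set_in_hand(hand, card_set):
--     hs = sorted(hand)
--     cs = sorted(card_set)
--     i = j = 0
--     total = 0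
--     while i < len(hs) and j < len(cs):
--         if hs[i] < cs[j]:
--             i += 1
--         elif cs[j] < hs[i]:
--             j += 1
--         else:
--             v = hs[i]
--             a = 0
--             while i < len(hs) and hs[i] == v:
--                 a += 1
--                 i += 1
--             b = 0
--             while j < len(cs) and cs[j] == v:
--                 b += 1
--                 j += 1
--             total += a * b
--     return total
-- ===== Notes on version B (the rewrite author's own statement) =====
-- stated objective: faster
-- what changed: Replaces A's per-card hand.count scan (and its dead diff/in_hand bookkeeping) with a sort-and-merge: both lists are sorted, then one two-pointer sweep multiplies the lengths of matching equal-value runs and sums the products.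
import Mathlib
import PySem

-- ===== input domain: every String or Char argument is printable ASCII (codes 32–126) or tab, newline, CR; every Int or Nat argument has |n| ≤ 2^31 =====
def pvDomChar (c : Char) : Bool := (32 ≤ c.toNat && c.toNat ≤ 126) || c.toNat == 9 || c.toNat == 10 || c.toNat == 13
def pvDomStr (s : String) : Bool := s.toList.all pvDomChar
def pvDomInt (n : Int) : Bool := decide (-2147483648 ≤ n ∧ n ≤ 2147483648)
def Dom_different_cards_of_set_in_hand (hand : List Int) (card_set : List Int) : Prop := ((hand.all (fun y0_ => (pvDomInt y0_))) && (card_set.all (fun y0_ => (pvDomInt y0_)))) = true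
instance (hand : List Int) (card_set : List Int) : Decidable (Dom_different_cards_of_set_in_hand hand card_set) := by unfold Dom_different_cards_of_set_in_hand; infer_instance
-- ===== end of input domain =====

-- B drops A's dead diff/in_hand bookkeeping and replaces the per-card hand.count scan by
-- sorting both lists and one two-pointer merge over equal-value runs (objective: faster).

-- ===== PORT A =====
-- helper of A: 'card in hand'
def pv_in_hand (hand : List Int) (card : Int) : Bool := hand.contains card

def different_cards_of_set_in_hand (hand : List Int) (card_set : List Int) : Int :=
  -- state (number_card_of_set_in_hand, diff); returns the first component
  (card_set.foldl (fun (st : Int × Int) card =>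
      let st := (st.1 + (PySem.List.count hand card : Int), st.2)
      if pv_in_hand hand card then (st.1, st.2 + 1) else st)
    (0, 0)).1

-- ===== PORT B =====
-- the inner 'while … == v' run loops of Source B: (run length, rest of the list)
def pv_takeRun (v : Int) : List Int → Nat × List Int
  | [] => (0, [])
  | z :: zs => if z == v then ((pv_takeRun v zs).1 + 1, (pv_takeRun v zs).2) else (0, z :: zs)

theorem pv_takeRun_len (v : Int) (l : List Int) : (pv_takeRun v l).2.length ≤ l.length := by
  induction l with
  | nil => simp [pv_takeRun]
  | cons z zs ih =>
    by_cases h : z == v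
    · simp [pv_takeRun, h]; omega
    · simp [pv_takeRun, h]

-- the outer two-pointer while loop of Source B (advancing an index = dropping the head)
def pv_mergeCount : List Int → List Int → Int
  | [], _ => 0
  | _ :: _, [] => 0
  | x :: xs, y :: ys =>
    if x < y then pv_mergeCount xs (y :: ys)
    else if y < x then pv_mergeCount (x :: xs) ys
    else
      ((pv_takeRun x (x :: xs)).1 : Int) * ((pv_takeRun x (y :: ys)).1 : Int)
        + pv_mergeCount (pv_takeRun x (x :: xs)).2 (pv_takeRun x (y :: ys)).2
termination_by xs ys => xs.length + ys.length
decreasing_by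
  · simp
  · simp
  · have h1 : (pv_takeRun x xs).2.length ≤ xs.length := pv_takeRun_len x xs
    have h2 : (pv_takeRun x ys).2.length ≤ ys.length := pv_takeRun_len x ys
    have hy : y == x := by simp_all; omega
    simp [pv_takeRun, hy]
    omega

def different_cards_of_set_in_hand_alt (hand : List Int) (card_set : List Int) : Int :=
  pv_mergeCount (PySem.List.sorted hand (fun x => x) false)
    (PySem.List.sorted card_set (fun x => x) false)

-- ===== PRECONDITION & SPEC =====
def Spec_different_cards_of_set_in_hand (hand : List Int) (card_set : List Int) (out : Int) : Prop := out = different_cards_of_set_in_hand_alt hand card_set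
instance (hand : List Int) (card_set : List Int) (out : Int) : Decidable (Spec_different_cards_of_set_in_hand hand card_set out) := by unfold Spec_different_cards_of_set_in_hand; infer_instance

-- ===== CLAIM (what is proved, stated in full; the proofs are below) =====
def Claim_equal_different_cards_of_set_in_hand : Prop := ∀ (hand : List Int) (card_set : List Int), Dom_different_cards_of_set_in_hand hand card_set → Spec_different_cards_of_set_in_hand hand card_set (different_cards_of_set_in_hand hand card_set)

-- ===== LEMMAS AND PROOFS =====

-- pair-count sum: Σ_{h ∈ xs} (number of occurrences of h in ys), as an Int
def pvS (xs ys : List Int) : Int := (xs.map (fun h => ((ys.count h : Nat) : Int))).sum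

-- A's fold: the first component accumulates the sum of hand-counts over card_set
theorem pvA_fold (hand cs : List Int) (n d : Int) :
    (cs.foldl (fun (st : Int × Int) card =>
        let st := (st.1 + (PySem.List.count hand card : Int), st.2)
        if pv_in_hand hand card then (st.1, st.2 + 1) else st)
      (n, d)).1 = n + (cs.map (fun c => (PySem.List.count hand c : Int))).sum := by
  induction cs generalizing n d with
  | nil => simp
  | cons c t ih =>
    rw [List.foldl_cons, List.map_cons, List.sum_cons]
    by_cases h : pv_in_hand hand c = true <;> simp only [h, if_pos, if_neg, Bool.false_eq_true,
      not_false_eq_true] <;> rw [ih] <;> ring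

-- double counting: summing hand-multiplicities over cs = summing cs-multiplicities over hand
theorem pv_double_count (hand cs : List Int) :
    (cs.map (fun c => (PySem.List.count hand c : Int))).sum = pvS hand cs := by
  unfold pvS
  simp only [PySem.List.count_eq]
  induction hand with
  | nil => simp
  | cons h t ih =>
    simp only [List.map_cons, List.sum_cons, List.count_cons, ← ih]
    rw [show (fun c => ((List.count c t + if h == c then 1 else 0 : Nat) : Int))
        = fun c => (List.count c t : Int) + (if h == c then 1 else 0) by
      funext c; by_cases hb : h == c <;> simp [hb]]
    rw [PySem.List.sum_map_add_int, PySem.List.sum_map_ite_one_zero]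
    have hcp : cs.countP (fun c => h == c) = cs.count h := by
      rw [List.count_eq_countP]
      exact List.countP_congr (fun a _ => by simp only [beq_iff_eq]; exact eq_comm)
    rw [hcp]; ring

-- takeRun splits off the leading run of v: l = replicate a v ++ rest, rest does not start with v
theorem pv_takeRun_split (v : Int) (l : List Int) :
    l = List.replicate (pv_takeRun v l).1 v ++ (pv_takeRun v l).2 ∧
      ∀ h, (pv_takeRun v l).2.head? = some h → h ≠ v := by
  induction l with
  | nil => simp [pv_takeRun]
  | cons z zs ih =>
    by_cases hz : z == v
    · have hzv : z = v := by simpa using hz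
      refine ⟨?_, ?_⟩
      · simp [pv_takeRun, List.replicate_succ, hzv]
        exact ih.1
      · intro h hh
        exact ih.2 h (by simpa [pv_takeRun, hz] using hh)
    · refine ⟨by simp [pv_takeRun, hz], ?_⟩
      intro h hh
      simp [pv_takeRun, hz] at hh
      subst hh
      simpa using hz

-- on a sorted list whose elements are all ≥ v, takeRun's rest contains no v at all
theorem pv_takeRun_rest_gt (v : Int) (l : List Int)
    (hs : l.Pairwise (· ≤ ·)) (hge : ∀ e ∈ l, v ≤ e) :
    ∀ e ∈ (pv_takeRun v l).2, v < e := by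
  obtain ⟨hsplit, hhead⟩ := pv_takeRun_split v l
  intro e he
  have hrs : (pv_takeRun v l).2.Pairwise (· ≤ ·) := by
    rw [hsplit] at hs; exact (List.pairwise_append.mp hs).2.1
  cases hr : (pv_takeRun v l).2 with
  | nil => simp [hr] at he
  | cons h t =>
    have hhv : h ≠ v := hhead h (by simp [hr])
    have hv_le_h : v ≤ h := hge h (by rw [hsplit]; simp [hr])
    have hvh : v < h := lt_of_le_of_ne hv_le_h (Ne.symm hhv)
    rw [hr] at he
    rcases List.mem_cons.mp he with rfl | ht
    · exact hvh
    · exact lt_of_lt_of_le hvh ((List.pairwise_cons.mp (hr ▸ hrs)).1 e ht)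

-- sum of counts over a replicate block
theorem pvS_replicate (a : Nat) (v : Int) (ys : List Int) :
    pvS (List.replicate a v) ys = (a : Int) * ((ys.count v : Nat) : Int) := by
  unfold pvS
  rw [List.map_replicate, List.sum_replicate, nsmul_eq_mul]

theorem pvS_append (xs₁ xs₂ ys : List Int) :
    pvS (xs₁ ++ xs₂) ys = pvS xs₁ ys + pvS xs₂ ys := by
  unfold pvS; rw [List.map_append, List.sum_append]

-- the merge computes the pair-count sum on sorted lists
theorem pv_merge_eq_S : ∀ (n : Nat) (xs ys : List Int), xs.length + ys.length ≤ n →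
    xs.Pairwise (· ≤ ·) → ys.Pairwise (· ≤ ·) → pv_mergeCount xs ys = pvS xs ys := by
  intro n
  induction n with
  | zero =>
    intro xs ys hlen _ _
    have hx : xs = [] := List.eq_nil_of_length_eq_zero (by omega)
    subst hx; simp [pv_mergeCount, pvS]
  | succ n ih =>
    intro xs ys hlen hxs hys
    match xs, ys with
    | [], ys => simp [pv_mergeCount, pvS]
    | x :: xs, [] =>
      simp only [pv_mergeCount]
      unfold pvS; simp
    | x :: xs, y :: ys =>
      have hxtail : ∀ e ∈ xs, x ≤ e := (List.pairwise_cons.mp hxs).1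
      have hytail : ∀ e ∈ ys, y ≤ e := (List.pairwise_cons.mp hys).1
      by_cases hlt : x < y
      · -- x occurs nowhere in y::ys
        have hnot : x ∉ y :: ys := by
          intro hm
          rcases List.mem_cons.mp hm with rfl | hm'
          · omega
          · exact absurd (hytail x hm') (by omega)
        rw [pv_mergeCount, if_pos hlt,
          ih xs (y :: ys) (by simp at hlen ⊢; omega) (List.Pairwise.of_cons hxs) hys]
        unfold pvS
        simp [List.count_eq_zero.mpr hnot]
      · by_cases hgt : y < x
        · -- y occurs nowhere in x::xs: dropping it changes no count used
          rw [pv_mergeCount, if_neg hlt, if_pos hgt,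
            ih (x :: xs) ys (by simp at hlen ⊢; omega) hxs (List.Pairwise.of_cons hys)]
          unfold pvS
          congr 1
          refine List.map_congr_left (fun h hm => ?_)
          have hxh : x ≤ h := by
            rcases List.mem_cons.mp hm with rfl | hm'
            · exact le_refl _
            · exact hxtail h hm'
          have : h ≠ y := by omega
          simp [Ne.symm this]
        · -- x = y: peel equal runs of length a and b, add a*b
          have hxy : x = y := by omega
          subst hxy
          obtain ⟨hsp1, _⟩ := pv_takeRun_split x (x :: xs)
          obtain ⟨hsp2, _⟩ := pv_takeRun_split x (x :: ys)
          set a := (pv_takeRun x (x :: xs)).1 with ha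
          set r1 := (pv_takeRun x (x :: xs)).2 with hr1
          set b := (pv_takeRun x (x :: ys)).1 with hb
          set r2 := (pv_takeRun x (x :: ys)).2 with hr2
          have hge1 : ∀ e ∈ x :: xs, x ≤ e := by
            intro e he; rcases List.mem_cons.mp he with rfl | he'
            · exact le_refl _
            · exact hxtail e he'
          have hge2 : ∀ e ∈ x :: ys, x ≤ e := by
            intro e he; rcases List.mem_cons.mp he with rfl | he'
            · exact le_refl _
            · exact hytail e he'
          have hgt1 : ∀ e ∈ r1, x < e := pv_takeRun_rest_gt x (x :: xs) hxs hge1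
          have hgt2 : ∀ e ∈ r2, x < e := pv_takeRun_rest_gt x (x :: ys) hys hge2
          have hs1 : r1.Pairwise (· ≤ ·) := by
            rw [hsp1] at hxs; exact (List.pairwise_append.mp hxs).2.1
          have hs2 : r2.Pairwise (· ≤ ·) := by
            rw [hsp2] at hys; exact (List.pairwise_append.mp hys).2.1
          have hcount2 : ((x :: ys).count x : Nat) = b := by
            rw [hsp2, List.count_append, List.count_replicate]
            have : x ∉ r2 := fun hm => absurd (hgt2 x hm) (by omega)
            simp [List.count_eq_zero.mpr this]
          have hlen1 : r1.length ≤ xs.length := by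
            have := pv_takeRun_len x xs
            simp only [hr1, pv_takeRun, beq_self_eq_true, if_true]
            exact this
          have hlen2 : r2.length ≤ ys.length := by
            have := pv_takeRun_len x ys
            simp only [hr2, pv_takeRun, beq_self_eq_true, if_true]
            exact this
          rw [pv_mergeCount, if_neg hlt, if_neg hgt]
          rw [ih r1 r2 (by simp at hlen; omega) hs1 hs2]
          -- pvS (x::xs) (x::ys) = a*b + pvS r1 r2
          conv_rhs => rw [show (x :: xs) = List.replicate a x ++ r1 from hsp1]
          rw [pvS_append, pvS_replicate, hcount2]
          have hr1counts : pvS r1 (x :: ys) = pvS r1 r2 := by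
            unfold pvS
            congr 1
            refine List.map_congr_left (fun h hm => ?_)
            have hxh : x < h := hgt1 h hm
            rw [hsp2, List.count_append, List.count_replicate]
            have hhx : ¬ h = x := by omega
            simp [Ne.symm hhx]
          rw [hr1counts]

-- a permutation changes neither side of pvS
theorem pvS_perm (xs xs' ys ys' : List Int) (hx : xs.Perm xs') (hy : ys.Perm ys') :
    pvS xs ys = pvS xs' ys' := by
  unfold pvS
  have hcong : xs.map (fun h => ((ys.count h : Nat) : Int))
      = xs.map (fun h => ((ys'.count h : Nat) : Int)) := by
    refine List.map_congr_left (fun h _ => ?_)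
    rw [hy.count_eq]
  rw [hcong]
  exact (hx.map _).sum_eq

-- ===== VERDICT (by name: the statement is the Claim_ definition above) =====
theorem different_cards_of_set_in_hand_spec : Claim_equal_different_cards_of_set_in_hand := by
  intro hand cs _
  unfold Spec_different_cards_of_set_in_hand different_cards_of_set_in_hand
    different_cards_of_set_in_hand_alt
  rw [pvA_fold, pv_double_count]
  have h1 := PySem.List.sorted_perm hand (fun x => x) false
  have h2 := PySem.List.sorted_perm cs (fun x => x) false
  rw [pvS_perm hand (PySem.List.sorted hand (fun x => x) false) cs
      (PySem.List.sorted cs (fun x => x) false) h1.symm h2.symm]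
  rw [pv_merge_eq_S ((PySem.List.sorted hand (fun x => x) false).length
      + (PySem.List.sorted cs (fun x => x) false).length) _ _ le_rfl
      (by simpa using PySem.List.sorted_pairwise hand (fun x => x))
      (by simpa using PySem.List.sorted_pairwise cs (fun x => x))]
  ring
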